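-- pv_equiv track=rewrite | github.com/MrBrantCode/unitest_baseline | mut_generate/mist_train_cf/cf_21218/solution.py | sum_corresponding_elements
-- ===== SOURCE A (Python) =====
-- def sum_corresponding_elements(arr1, arr2):
--     """
--     This function takes two arrays of integers as input and returns a new array containing
--     the sum of corresponding elements from both arrays. If the sum of corresponding elements
--     exceeds 100, the function appends 100 to the new array instead.
--
--     Args:
--         arr1 (list): The first array of integers.
--         arr2 (list): The second array of integers.
--
--     Returns:
--         list: A new array containing the sum of corresponding elements from both arrays.
--     """
--
--     # Find the maximum length of the two arrays
--     max_len = max(len(arr1), len(arr2))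
--
--     # Initialize a new array to store the sum of corresponding elements
--     new_arr = []
--
--     # Iterate through the arrays
--     for i in range(max_len):
--         # Get the corresponding elements from arr1 and arr2, defaulting to 0 if out of range
--         element1 = arr1[i] if i < len(arr1) else 0
--         element2 = arr2[i] if i < len(arr2) else 0
--
--         # Calculate the sum of the corresponding elements
--         sum_elements = element1 + element2
--
--         # If the sum exceeds 100, append 100 to the new array
--         new_arr.append(100 if sum_elements > 100 else sum_elements)
--
--     return new_arr
-- ===== SOURCE B (Python) =====
-- def sum_corresponding_elements(arr1, arr2):
--     n = min(len(arr1), len(arr2))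
--     head = [min(a + b, 100) for a, b in zip(arr1, arr2)]
--     tail = arr1[n:] if len(arr1) > len(arr2) else arr2[n:]
--     return head + [min(x, 100) for x in tail]
-- ===== Notes on version B (the rewrite author's own statement) =====
-- stated objective: idiomatic
-- what changed: Replaces the single padded index loop over range(max_len) with a zip over the overlap plus a separately capped tail of the longer list, concatenated.
import Mathlib
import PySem

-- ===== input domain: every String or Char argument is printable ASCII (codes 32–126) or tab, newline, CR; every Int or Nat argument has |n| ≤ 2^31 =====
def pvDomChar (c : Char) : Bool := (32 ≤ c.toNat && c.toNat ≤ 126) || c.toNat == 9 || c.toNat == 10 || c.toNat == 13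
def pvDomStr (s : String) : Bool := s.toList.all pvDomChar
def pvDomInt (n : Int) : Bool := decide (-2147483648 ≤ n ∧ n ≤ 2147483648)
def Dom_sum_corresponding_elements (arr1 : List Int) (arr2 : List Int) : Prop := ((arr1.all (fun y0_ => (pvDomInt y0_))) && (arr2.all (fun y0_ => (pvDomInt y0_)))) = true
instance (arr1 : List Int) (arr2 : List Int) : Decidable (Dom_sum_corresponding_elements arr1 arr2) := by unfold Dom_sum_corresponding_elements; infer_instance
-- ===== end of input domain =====

-- B replaces A's single padded loop over range(max_len) by a zip over the overlap plus a capped tail of the longer list (idiomatic decomposition; same cost).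

-- ===== PORT A =====
def sum_corresponding_elements (arr1 : List Int) (arr2 : List Int) : List Int :=
  -- max_len = max(len(arr1), len(arr2)); for i in range(max_len): new_arr.append(100 if sum > 100 else sum)
  (PySem.List.pyRange 0 (max (arr1.length : Int) (arr2.length : Int)) 1).foldl
    (fun new_arr i =>
      let element1 := if i < (arr1.length : Int) then PySem.List.pyGetD arr1 i 0 else 0
      let element2 := if i < (arr2.length : Int) then PySem.List.pyGetD arr2 i 0 else 0
      let sum_elements := element1 + element2
      new_arr ++ [if sum_elements > 100 then 100 else sum_elements]) []

-- ===== PORT B =====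
def sum_corresponding_elements_alt (arr1 : List Int) (arr2 : List Int) : List Int :=
  let n := min arr1.length arr2.length
  let head := List.zipWith (fun a b => min (a + b) 100) arr1 arr2
  let tail := if arr1.length > arr2.length then arr1.drop n else arr2.drop n
  head ++ tail.map (fun x => min x 100)

-- ===== PRECONDITION & SPEC =====
def Spec_sum_corresponding_elements (arr1 : List Int) (arr2 : List Int) (out : List Int) : Prop := out = sum_corresponding_elements_alt arr1 arr2
instance (arr1 : List Int) (arr2 : List Int) (out : List Int) : Decidable (Spec_sum_corresponding_elements arr1 arr2 out) := by unfold Spec_sum_corresponding_elements; infer_instance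

-- ===== CLAIM (what is proved, stated in full; the proofs are below) =====
def Claim_equal_sum_corresponding_elements : Prop := ∀ (arr1 : List Int) (arr2 : List Int), Dom_sum_corresponding_elements arr1 arr2 → Spec_sum_corresponding_elements arr1 arr2 (sum_corresponding_elements arr1 arr2)

-- ===== LEMMAS AND PROOFS =====

-- A's per-index body, with the index already a Nat and the cap written as `min`
def pvBody (arr1 arr2 : List Int) (k : Nat) : Int :=
  min ((if k < arr1.length then arr1.getD k 0 else 0) +
       (if k < arr2.length then arr2.getD k 0 else 0)) 100

-- A's loop is a map of pvBody over List.range of the max length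
lemma A_eq_map (arr1 arr2 : List Int) :
    sum_corresponding_elements arr1 arr2 =
      (List.range (max arr1.length arr2.length)).map (pvBody arr1 arr2) := by
  unfold sum_corresponding_elements
  rw [PySem.List.foldl_append_singleton_eq_map, PySem.List.pyRange_one, List.map_map]
  have h : (max (arr1.length : Int) (arr2.length : Int) - 0).toNat
      = max arr1.length arr2.length := by omega
  rw [h]
  refine List.map_congr_left (fun k _ => ?_)
  simp only [Function.comp, zero_add, PySem.List.pyGetD_natCast, Nat.cast_lt, pvBody]
  split_ifs <;> omega

-- one-sided case: only one list contributes
lemma map_range_one_sided (f : Int → Int) (xs : List Int) :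
    (List.range xs.length).map (fun k => f (if k < xs.length then xs.getD k 0 else 0))
      = xs.map f := by
  induction xs with
  | nil => simp
  | cons x xs ih =>
    rw [List.length_cons, List.range_succ_eq_map, List.map_cons, List.map_map]
    congr 1
    rw [← ih]
    refine List.map_congr_left (fun k _ => ?_)
    simp [Function.comp, Nat.succ_eq_add_one, List.getD]

-- B peels one element off both lists
lemma alt_cons (a b : Int) (as bs : List Int) :
    sum_corresponding_elements_alt (a :: as) (b :: bs)
      = min (a + b) 100 :: sum_corresponding_elements_alt as bs := by
  unfold sum_corresponding_elements_alt
  simp only [List.length_cons, List.zipWith_cons_cons, gt_iff_lt, Nat.add_lt_add_iff_right]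
  have hmin : min (as.length + 1) (bs.length + 1) = min as.length bs.length + 1 := by omega
  rw [hmin]
  by_cases h : bs.length < as.length
  · rw [if_pos h, if_pos h, List.drop_succ_cons, List.cons_append]
  · rw [if_neg h, if_neg h, List.drop_succ_cons, List.cons_append]

-- main equivalence on the map form
lemma key (arr1 : List Int) : ∀ (arr2 : List Int),
    (List.range (max arr1.length arr2.length)).map (pvBody arr1 arr2)
      = sum_corresponding_elements_alt arr1 arr2 := by
  induction arr1 with
  | nil =>
    intro arr2
    unfold sum_corresponding_elements_alt
    simp only [List.length_nil, List.zipWith_nil_left, List.nil_append,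
      Nat.max_eq_right (Nat.zero_le _), Nat.min_eq_left (Nat.zero_le _), List.drop_zero]
    rw [if_neg (by omega : ¬ ((0:Nat) > arr2.length))]
    rw [← map_range_one_sided (fun v => min v 100) arr2]
    refine List.map_congr_left (fun k _ => ?_)
    simp [pvBody]
  | cons a as ih =>
    intro arr2
    cases arr2 with
    | nil =>
      unfold sum_corresponding_elements_alt
      simp only [List.length_nil, List.zipWith_nil_right, List.nil_append,
        Nat.max_eq_left (Nat.zero_le _), Nat.min_eq_right (Nat.zero_le _), List.drop_zero]
      rw [if_pos (show (a :: as).length > 0 by simp)]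
      rw [← map_range_one_sided (fun v => min v 100) (a :: as)]
      refine List.map_congr_left (fun k _ => ?_)
      simp [pvBody]
    | cons b bs =>
      rw [alt_cons]
      have hmax : max (a :: as).length (b :: bs).length = max as.length bs.length + 1 := by
        simp only [List.length_cons]; omega
      rw [hmax, List.range_succ_eq_map, List.map_cons, List.map_map]
      have hhead : pvBody (a :: as) (b :: bs) 0 = min (a + b) 100 := by
        simp [pvBody]
      have htail : (List.range (max as.length bs.length)).map (pvBody (a :: as) (b :: bs) ∘ (· + 1))
          = (List.range (max as.length bs.length)).map (pvBody as bs) := by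
        refine List.map_congr_left (fun k _ => ?_)
        simp [pvBody, Function.comp]
      rw [hhead, htail, ih bs]

-- ===== VERDICT (by name: the statement is the Claim_ definition above) =====
theorem sum_corresponding_elements_spec : Claim_equal_sum_corresponding_elements := by
  intro arr1 arr2 _
  unfold Spec_sum_corresponding_elements
  rw [A_eq_map, key]
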